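-- pv_equiv track=rewrite | github.com/amelia7772/ElementClicker | quest_screen/QuestLine.py | __get_the_length_of_longest_line_in_text__
-- ===== SOURCE A (Python) =====
-- def __get_the_length_of_longest_line_in_text__(text: str):
--     length_of_longest_line = 0
--     length_of_current_line = 0
--     for character in text:
--         if character == '\n':
--             length_of_longest_line = max(length_of_longest_line, length_of_current_line)
--             length_of_current_line = 0
--         else:
--             length_of_current_line += 1
--     return length_of_longest_line
-- ===== SOURCE B (Python) =====
-- def __get_the_length_of_longest_line_in_text__(text: str):
--     lines = text.split('\n')
--     return max((len(line) for line in lines[:-1]), default=0)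
-- ===== Notes on version B (the rewrite author's own statement) =====
-- stated objective: simpler
-- what changed: Replaces the character-by-character scan with running counters by splitting the text into lines once and taking the maximum length over the newline-terminated lines.
import Mathlib
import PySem

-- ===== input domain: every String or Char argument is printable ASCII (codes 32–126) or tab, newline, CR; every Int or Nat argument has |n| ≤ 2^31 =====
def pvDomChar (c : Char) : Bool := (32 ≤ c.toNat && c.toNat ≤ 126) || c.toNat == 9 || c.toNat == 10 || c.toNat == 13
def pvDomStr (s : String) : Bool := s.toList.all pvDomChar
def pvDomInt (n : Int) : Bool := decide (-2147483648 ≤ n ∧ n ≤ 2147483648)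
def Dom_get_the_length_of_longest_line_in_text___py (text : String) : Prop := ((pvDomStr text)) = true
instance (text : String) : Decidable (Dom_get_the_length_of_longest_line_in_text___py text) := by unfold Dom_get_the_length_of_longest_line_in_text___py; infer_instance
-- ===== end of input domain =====

-- B splits the text into lines once and takes the maximum length over the newline-terminated lines,
-- instead of A's character scan with running counters (objective: simpler).


-- ===== PORT A =====
-- for character in text: if '\n' → fold the current counter into the max and reset, else count
def get_the_length_of_longest_line_in_text___py (text : String) : Int :=
  (text.toList.foldl
    (fun (st : Int × Int) c =>
      if c = '\n' then (max st.1 st.2, 0) else (st.1, st.2 + 1))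
    (0, 0)).1

-- ===== PORT B =====
-- lines = text.split('\n'); max over len of lines[:-1], default 0
def get_the_length_of_longest_line_in_text___py_alt (text : String) : Int :=
  PySem.List.maxD
    ((PySem.List.slice (text.toList.splitOn '\n') none (some (-1))).map (fun l => (l.length : Int)))
    (fun x => x) 0

-- ===== PRECONDITION & SPEC =====
def Spec_get_the_length_of_longest_line_in_text___py (text : String) (out : Int) : Prop := out = get_the_length_of_longest_line_in_text___py_alt text
instance (text : String) (out : Int) : Decidable (Spec_get_the_length_of_longest_line_in_text___py text out) := by unfold Spec_get_the_length_of_longest_line_in_text___py; infer_instance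

-- ===== CLAIM (what is proved, stated in full; the proofs are below) =====
def Claim_equal_get_the_length_of_longest_line_in_text___py : Prop := ∀ (text : String), Dom_get_the_length_of_longest_line_in_text___py text → Spec_get_the_length_of_longest_line_in_text___py text (get_the_length_of_longest_line_in_text___py text)

-- ===== LEMMAS AND PROOFS =====

-- lengths of the completed (newline-terminated) lines of cs, the head offset by cur
def pvLens (cs : List Char) (cur : Int) : List Int :=
  (((cs.splitOnP (· == '\n')).dropLast.map (fun l => (l.length : Int))).modifyHead (fun x => cur + x))

lemma pvSplitOnP_ne_nil (cs : List Char) : cs.splitOnP (· == '\n') ≠ [] := by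
  induction cs with
  | nil => simp [List.splitOnP_nil]
  | cons c cs ih =>
    rw [List.splitOnP_cons]
    split_ifs
    · simp
    · cases h : cs.splitOnP (· == '\n') <;> simp_all

lemma pvLens_nil (cur : Int) : pvLens [] cur = [] := by
  simp [pvLens, List.splitOnP_nil]

lemma pvLens_cons_nl (cs : List Char) (cur : Int) :
    pvLens ('\n' :: cs) cur = cur :: pvLens cs 0 := by
  unfold pvLens
  rw [List.splitOnP_cons]
  simp only [if_pos (by decide : (('\n' : Char) == '\n') = true)]
  rcases h : cs.splitOnP (· == '\n') with _ | ⟨l, ls⟩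
  · exact absurd h (pvSplitOnP_ne_nil cs)
  · simp [List.dropLast]

lemma pvLens_cons_ne (c : Char) (cs : List Char) (cur : Int) (hc : ¬ c = '\n') :
    pvLens (c :: cs) cur = pvLens cs (cur + 1) := by
  unfold pvLens
  rw [List.splitOnP_cons]
  simp only [if_neg (by simpa using hc : ¬ ((c == '\n') = true))]
  rcases h : cs.splitOnP (· == '\n') with _ | ⟨l, ls⟩
  · exact absurd h (pvSplitOnP_ne_nil cs)
  · cases ls <;> simp [List.modifyHead] <;> ring_nf

lemma pvMain (cs : List Char) (longest cur : Int) :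
    (cs.foldl
      (fun (st : Int × Int) c =>
        if c = '\n' then (max st.1 st.2, 0) else (st.1, st.2 + 1))
      (longest, cur)).1 = (pvLens cs cur).foldl max longest := by
  induction cs generalizing longest cur with
  | nil => simp [pvLens_nil]
  | cons c cs ih =>
    by_cases hc : c = '\n'
    · subst hc
      simp only [List.foldl_cons, pvLens_cons_nl]
      exact ih (max longest cur) 0
    · rw [List.foldl_cons, if_neg (by simpa using hc), pvLens_cons_ne c cs cur hc]
      exact ih longest (cur + 1)

lemma pvFoldl_max_drop (ls : List Int) (x : Int) (hx : 0 ≤ x) :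
    ls.foldl max (max 0 x) = ls.foldl max x := by
  rw [max_eq_right hx]

lemma pvModifyHead_zero (l : List Int) : l.modifyHead (fun x => 0 + x) = l := by
  cases l <;> simp

lemma pvMaxD_eq (ls : List Int) (h : ∀ x ∈ ls, 0 ≤ x) :
    PySem.List.maxD ls (fun x => x) 0 = ls.foldl max 0 := by
  cases ls with
  | nil => rfl
  | cons x t =>
    simp only [PySem.List.maxD, PySem.List.max?_id_cons, Option.getD_some, List.foldl_cons]
    rw [pvFoldl_max_drop t x (h x (List.mem_cons_self))]

-- ===== VERDICT (by name: the statement is the Claim_ definition above) =====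
theorem get_the_length_of_longest_line_in_text___py_spec : Claim_equal_get_the_length_of_longest_line_in_text___py := by
  intro text _
  unfold Spec_get_the_length_of_longest_line_in_text___py
  unfold get_the_length_of_longest_line_in_text___py get_the_length_of_longest_line_in_text___py_alt
  rw [pvMain, PySem.List.slice_to_neg_one]
  have hnn : ∀ x ∈ ((text.toList.splitOn '\n').dropLast.map (fun l => (l.length : Int))), 0 ≤ x := by
    intro x hx
    rcases List.mem_map.mp hx with ⟨l, _, hl⟩
    omega
  rw [pvMaxD_eq _ hnn]
  unfold pvLens
  rw [show text.toList.splitOn '\n' = text.toList.splitOnP (· == '\n') from rfl,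
      pvModifyHead_zero]
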